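-- pv_equiv track=rewrite | github.com/nitin22032002/leetcode_question | 468-validate-ip-address/468-validate-ip-address.py | validNumber
-- ===== SOURCE A (Python) =====
-- def validNumber(n):
--     num=0
--     if(len(n)==0):
--         return False
--     if(len(n)>=2):
--         if(n[0]=="0"):
--             return False
--     for item in n:
--         if(item>='0' and item<='9'):
--             num=(num*10)+int(item)
--         else:
--             return False
--     if(num<=255):
--         return True
--     return False
-- ===== SOURCE B (Python) =====
-- def validNumber(n):
--     if not (n.isascii() and n.isdigit()):
--         return False
--     if len(n) > 1 and n[0] == '0':
--         return False
--     return len(n) < 3 or (len(n) == 3 and n <= "255")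
-- ===== Notes on version B (the rewrite author's own statement) =====
-- stated objective: simpler
-- what changed: Replaces A's character-by-character numeric accumulation loop with a no-arithmetic decomposition: an isascii/isdigit pass, a leading-zero check, and a length test plus one lexicographic string comparison against the three-digit bound, so the number is never computed.
import Mathlib
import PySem

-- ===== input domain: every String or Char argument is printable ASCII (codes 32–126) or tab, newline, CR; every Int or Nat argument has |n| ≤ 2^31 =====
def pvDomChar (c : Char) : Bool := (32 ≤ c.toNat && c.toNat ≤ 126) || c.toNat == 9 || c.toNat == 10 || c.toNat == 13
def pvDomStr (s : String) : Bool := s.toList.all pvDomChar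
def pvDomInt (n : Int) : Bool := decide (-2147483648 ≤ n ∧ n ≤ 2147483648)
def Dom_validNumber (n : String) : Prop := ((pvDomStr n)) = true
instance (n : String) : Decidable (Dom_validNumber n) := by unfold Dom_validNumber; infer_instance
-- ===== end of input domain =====

-- B replaces A's digit-accumulation loop by a validate-then-compare decomposition
-- (isascii+isdigit pass, leading-zero check, length test with one lexicographic compare
-- against "255"); objective: simpler, no numeric parsing at all.


-- ===== PORT A =====
-- the for-loop of A: accumulate num, early-return False on a non-digit char, then num ≤ 255.
-- int(item) of a char in the digit branch is its code point minus 48 (exact: the branch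
-- guarantees '0' ≤ item ≤ '9').
def validNumberGo (num : Int) (cs : List Char) : Bool :=
  match cs with
  | [] => decide (num ≤ 255)
  | c :: rest =>
    if '0' ≤ c ∧ c ≤ '9' then validNumberGo (num * 10 + ((c.toNat : Int) - 48)) rest
    else false

def validNumber (n : String) : Bool :=
  let cs := n.toList
  if cs.length = 0 then false
  else if 2 ≤ cs.length ∧ PySem.List.pyGet? cs 0 = some '0' then false
  else validNumberGo 0 cs

-- ===== PORT B =====
-- Python's s <= t on str: code-point lexicographic, = Lean's ≤ on the char lists
def validNumber_alt (n : String) : Bool :=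
  let cs := n.toList
  if !(cs.all (fun c => c.toNat < 128) && PySem.Chars.strIsdigit cs) then false
  else if 1 < cs.length ∧ PySem.List.pyGet? cs 0 = some '0' then false
  else decide (cs.length < 3 ∨ (cs.length = 3 ∧ ¬ ("255".toList < cs)))

-- ===== PRECONDITION & SPEC =====
def Spec_validNumber (n : String) (out : Bool) : Prop := out = validNumber_alt n
instance (n : String) (out : Bool) : Decidable (Spec_validNumber n out) := by unfold Spec_validNumber; infer_instance

-- ===== CLAIM (what is proved, stated in full; the proofs are below) =====
def Claim_equal_validNumber : Prop := ∀ (n : String), Dom_validNumber n → Spec_validNumber n (validNumber n)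

-- ===== LEMMAS AND PROOFS =====

def pvStep : Int → Char → Int := fun a c => a * 10 + ((c.toNat : Int) - 48)

theorem pvDigit_iff (c : Char) : ('0' ≤ c ∧ c ≤ '9') ↔ 48 ≤ c.toNat ∧ c.toNat ≤ 57 := by
  rw [Char.le_def, Char.le_def, UInt32.le_iff_toNat_le, UInt32.le_iff_toNat_le]
  exact Iff.rfl

theorem go_nondigit (num : Int) (cs : List Char) (h : ¬ ∀ c ∈ cs, ('0' ≤ c ∧ c ≤ '9')) :
    validNumberGo num cs = false := by
  induction cs generalizing num with
  | nil => simp at h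
  | cons c rest ih =>
    simp only [validNumberGo]
    by_cases hd : ('0' ≤ c ∧ c ≤ '9')
    · rw [if_pos hd]
      apply ih
      intro hall
      apply h
      intro x hx
      rcases List.mem_cons.mp hx with rfl | hx'
      · exact hd
      · exact hall x hx'
    · rw [if_neg hd]

theorem go_digits (num : Int) (cs : List Char) (h : ∀ c ∈ cs, ('0' ≤ c ∧ c ≤ '9')) :
    validNumberGo num cs = decide (cs.foldl pvStep num ≤ 255) := by
  induction cs generalizing num with
  | nil => simp [validNumberGo, List.foldl]
  | cons c rest ih =>
    have hd : ('0' ≤ c ∧ c ≤ '9') := h c (by simp)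
    simp only [validNumberGo]
    rw [if_pos hd]
    exact ih _ (fun x hx => h x (by simp [hx]))

theorem foldl_lower (cs : List Char) (num : Int) (h : ∀ c ∈ cs, ('0' ≤ c ∧ c ≤ '9')) (hn : 0 ≤ num) :
    num * 10 ^ cs.length ≤ cs.foldl pvStep num := by
  induction cs generalizing num with
  | nil => simp
  | cons c rest ih =>
    have hd := (pvDigit_iff c).mp (h c (by simp))
    have := ih (num * 10 + ((c.toNat : Int) - 48)) (fun x hx => h x (by simp [hx])) (by omega)
    simp only [List.foldl, List.length_cons, pvStep] at *
    have h10 : (0:Int) ≤ 10 ^ rest.length := by positivity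
    nlinarith [pow_succ (10:Int) rest.length]

theorem validNumber_spec_aux (n : String) : validNumber n = validNumber_alt n := by
  simp only [validNumber, validNumber_alt]
  generalize n.toList = cs
  by_cases hall : ∀ c ∈ cs, ('0' ≤ c ∧ c ≤ '9')
  · -- all chars are digits
    cases cs with
    | nil => simp [PySem.Chars.strIsdigit]
    | cons a rest =>
      have hda := (pvDigit_iff a).mp (hall a (by simp))
      have hascii : ((a :: rest).all (fun c => c.toNat < 128) &&
          PySem.Chars.strIsdigit (a :: rest)) = true := by
        simp only [Bool.and_eq_true, List.all_eq_true, PySem.Chars.strIsdigit,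
          PySem.Chars.isdigit, List.isEmpty_cons, Bool.not_false, Bool.true_and]
        constructor
        · intro c hc; have := (pvDigit_iff c).mp (hall c hc); simpa using by omega
        · intro c hc; have := hall c hc
          simp [this.1, this.2]
      rw [go_digits _ _ hall]
      have hget : PySem.List.pyGet? (a :: rest) 0 = some a := by
        simp [PySem.List.pyGet?, PySem.List.pyIdx?]
      simp only [hascii, Bool.not_true, Bool.false_eq_true, if_false,
        List.length_cons, hget, Option.some.injEq]
      rw [if_neg (show ¬(rest.length + 1 = 0) by omega)]
      by_cases hz : 2 ≤ rest.length + 1 ∧ a = '0'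
      · -- leading zero with length ≥ 2: both sides return False
        rw [if_pos hz, if_pos (show 1 < rest.length + 1 ∧ a = '0' from ⟨hz.1, hz.2⟩)]
      · rw [if_neg hz, if_neg (show ¬(1 < rest.length + 1 ∧ a = '0') from
          fun hc => hz ⟨hc.1, hc.2⟩)]
        rw [decide_eq_decide]
        -- A's accumulated value ≤ 255 ↔ B's length/lexicographic test
        match rest with
        | [] => -- length 1
          refine iff_of_true ?_ (Or.inl (by norm_num))
          simp only [List.foldl, pvStep]
          push_cast; omega
        | [b] => -- length 2
          refine iff_of_true ?_ (Or.inl (by norm_num))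
          have hdb := (pvDigit_iff b).mp (hall b (by simp))
          simp only [List.foldl, pvStep]
          push_cast; omega
        | [b, c] => -- length 3: value ≤ 255 ↔ ¬ "255" < [a,b,c]
          have hdb := (pvDigit_iff b).mp (hall b (by simp))
          have hdc := (pvDigit_iff c).mp (hall c (by simp))
          have hlex : ("255".toList < [a, b, c]) ↔
              ('2' < a ∨ ('2' = a ∧ ('5' < b ∨ ('5' = b ∧ '5' < c)))) := by
            show (['2','5','5'] < [a, b, c]) ↔ _
            rw [List.cons_lt_cons_iff, List.cons_lt_cons_iff, List.cons_lt_cons_iff]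
            simp
          have e2a : ('2':Char) < a ↔ 50 < a.toNat := by
            rw [Char.lt_def, UInt32.lt_iff_toNat_lt]; norm_num; rfl
          have e2e : ('2':Char) = a ↔ a.toNat = 50 := by
            constructor
            · rintro rfl; rfl
            · intro h; apply Char.ext; apply UInt32.toNat_inj.mp
              rw [show a.val.toNat = a.toNat from rfl, h]; rfl
          have e5b : ('5':Char) < b ↔ 53 < b.toNat := by
            rw [Char.lt_def, UInt32.lt_iff_toNat_lt]; norm_num; rfl
          have e5be : ('5':Char) = b ↔ b.toNat = 53 := by
            constructor
            · rintro rfl; rfl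
            · intro h; apply Char.ext; apply UInt32.toNat_inj.mp
              rw [show b.val.toNat = b.toNat from rfl, h]; rfl
          have e5c : ('5':Char) < c ↔ 53 < c.toNat := by
            rw [Char.lt_def, UInt32.lt_iff_toNat_lt]; norm_num; rfl
          rw [hlex, e2a, e2e, e5b, e5be, e5c]
          simp only [List.foldl, pvStep, List.length_cons, List.length_nil]
          push_cast
          constructor
          · intro h; norm_num; omega
          · intro h; norm_num at h; omega
        | b :: c :: d :: tl => -- length ≥ 4: value ≥ 1000 > 255
          have ha0 : a ≠ '0' := fun h => hz ⟨by simp, h⟩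
          have ha1 : 49 ≤ a.toNat := by
            rcases Nat.lt_or_ge 48 a.toNat with h | h
            · omega
            · exfalso; apply ha0; apply Char.ext; apply UInt32.toNat_inj.mp
              rw [show a.val.toNat = a.toNat from rfl, show ('0':Char).val.toNat = 48 from rfl]
              omega
          have hlow := foldl_lower (b :: c :: d :: tl)
            ((0:Int) * 10 + ((a.toNat : Int) - 48))
            (fun x hx => hall x (List.mem_cons_of_mem a hx)) (by push_cast; omega)
          refine iff_of_false ?_ ?_
          · simp only [List.foldl, pvStep] at hlow ⊢
            have hpow : (1000:Int) ≤ 10 ^ (b :: c :: d :: tl).length := by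
              calc (1000:Int) = 10 ^ 3 := by norm_num
              _ ≤ 10 ^ (b :: c :: d :: tl).length := by
                apply pow_le_pow_right₀ (by norm_num)
                simp only [List.length_cons]; omega
            have hnum1 : (1:Int) ≤ (0:Int) * 10 + ((a.toNat : Int) - 48) := by push_cast; omega
            intro hcon
            nlinarith
          · simp only [List.length_cons]
            push Not
            constructor
            · omega
            · intro h; omega
  · -- some char is not a digit: both sides are false
    have hB : (cs.all (fun c => c.toNat < 128) && PySem.Chars.strIsdigit cs) = false := by
      by_contra hc
      simp only [Bool.not_eq_false, Bool.and_eq_true, List.all_eq_true,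
        PySem.Chars.strIsdigit, PySem.Chars.isdigit, Bool.not_eq_true'] at hc
      apply hall
      intro c hcm
      have := hc.2.2 c hcm
      simp only [decide_eq_true_eq] at this
      exact this
    simp only [hB, Bool.not_false, if_true]
    cases cs with
    | nil => exact absurd (by simp) hall
    | cons a rest =>
      rw [go_nondigit _ _ hall]
      simp only [List.length_cons]
      split
      · rfl
      · split <;> rfl

-- ===== VERDICT (by name: the statement is the Claim_ definition above) =====
theorem validNumber_spec : Claim_equal_validNumber := by
  intro n _
  unfold Spec_validNumber
  exact validNumber_spec_aux n
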